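-- pv_equiv track=rewrite | github.com/timmykang/study | pbctf/queensarah2/sol.py | remake_list
-- ===== SOURCE A (Python) =====
-- def remake_list(a_list):
--     list_len = len(a_list)
--     assert list_len % 2 == 1
--     res_list = []
--     tmp = (list_len + 1) // 2
--     for i in range(list_len):
--         res_list.append(a_list[(i * tmp) % list_len])
--     return res_list
-- ===== SOURCE B (Python) =====
-- def remake_list(a_list):
--     list_len = len(a_list)
--     assert list_len % 2 == 1
--     # scatter instead of gather: (list_len+1)//2 is the inverse of 2 mod list_len,
--     # so res[i] = a_list[(i*tmp) % n] is the same as sending a_list[j] to (2*j) % n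
--     res = [None] * list_len
--     for j in range(list_len):
--         res[(2 * j) % list_len] = a_list[j]
--     return res
-- ===== Notes on version B (the rewrite author's own statement) =====
-- stated objective: alternative
-- what changed: A gathers each output position i from input index (i*(n+1)//2)%n; B scatters each input element j into a preallocated list at position (2*j)%n, using that (n+1)//2 is the inverse of 2 mod the odd length n.
import Mathlib
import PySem

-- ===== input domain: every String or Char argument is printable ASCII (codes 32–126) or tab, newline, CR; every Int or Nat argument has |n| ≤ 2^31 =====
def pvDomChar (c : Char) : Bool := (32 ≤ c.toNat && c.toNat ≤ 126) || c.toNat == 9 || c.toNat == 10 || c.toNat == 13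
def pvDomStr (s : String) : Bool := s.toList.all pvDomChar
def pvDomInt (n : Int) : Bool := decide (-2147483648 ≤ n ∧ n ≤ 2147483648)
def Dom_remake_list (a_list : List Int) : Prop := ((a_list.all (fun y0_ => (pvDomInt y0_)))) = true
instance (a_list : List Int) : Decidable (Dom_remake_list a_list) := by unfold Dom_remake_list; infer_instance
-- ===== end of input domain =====

-- B replaces A's gather res[i] = a[(i*(n+1)//2) % n] by a scatter res[(2*j) % n] = a[j]
-- into a preallocated list, using that (n+1)//2 is the inverse of 2 modulo the odd length n.

-- ===== PORT A =====
-- a_list[(i*tmp) % list_len]: the index is always in range under Pre_ (mod of a positive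
-- length), so the .getD 0 default is never used.
def remake_list (a_list : List Int) : List Int :=
  let list_len : Int := a_list.length
  let tmp : Int := PySem.Int.floordiv (list_len + 1) 2
  (PySem.List.pyRange 0 list_len 1).foldl
    (fun res_list i =>
      res_list ++ [(PySem.List.pyGet? a_list (PySem.Int.mod (i * tmp) list_len)).getD 0])
    []

-- ===== PORT B =====
-- [None] * list_len is ported as List.replicate with placeholder 0; under Pre_ every
-- position is overwritten exactly once, so the placeholder never survives.
def remake_list_alt (a_list : List Int) : List Int :=
  let list_len : Int := a_list.length
  (PySem.List.pyRange 0 list_len 1).foldl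
    (fun res j =>
      res.set (PySem.Int.mod (2 * j) list_len).toNat ((PySem.List.pyGet? a_list j).getD 0))
    (List.replicate a_list.length 0)

-- ===== PRECONDITION & SPEC =====
-- Pre_ excludes even-length lists (including []), on which A's assert raises AssertionError.
def Pre_remake_list (a_list : List Int) : Prop := a_list.length % 2 = 1
instance (a_list : List Int) : Decidable (Pre_remake_list a_list) := by
  unfold Pre_remake_list; infer_instance
def pvWitness_remake_list : List Int := [5, 7, 9]

def Spec_remake_list (a_list : List Int) (out : List Int) : Prop := out = remake_list_alt a_list
instance (a_list : List Int) (out : List Int) : Decidable (Spec_remake_list a_list out) := by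
  unfold Spec_remake_list; infer_instance

-- ===== CLAIM (what is proved, stated in full; the proofs are below) =====
def Claim_equal_remake_list : Prop :=
  ∀ (a_list : List Int), Dom_remake_list a_list → Pre_remake_list a_list →
    Spec_remake_list a_list (remake_list a_list)

-- ===== LEMMAS AND PROOFS =====

-- A's fold at Nat level: appending one element per index is List.map over the range.
lemma pv_foldl_append_map (f : Nat → Int) (l : List Nat) (acc : List Int) :
    l.foldl (fun res k => res ++ [f k]) acc = acc ++ l.map f := by
  induction l generalizing acc with
  | nil => simp
  | cons x xs ih => simp [ih]

-- B's fold at Nat level.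
def pv_build (a_list : List Int) (n : Nat) (m : Nat) : List Int :=
  (List.range m).foldl (fun res j => res.set ((2 * j) % n) (a_list.getD j 0))
    (List.replicate n 0)

lemma pv_build_length (a_list : List Int) (n m : Nat) :
    (pv_build a_list n m).length = n := by
  unfold pv_build
  induction m with
  | zero => simp
  | succ k ih => rw [List.range_succ, List.foldl_append]; simpa using ih

-- 2·j mod n is injective on [0, n) for odd n.
lemma pv_scatter_inj {n j j' : Nat} (hn : n % 2 = 1) (hj : j < n) (hj' : j' < n)
    (h : (2 * j) % n = (2 * j') % n) : j = j' := by
  have hcop : Nat.Coprime 2 n :=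
    (Nat.Prime.coprime_iff_not_dvd Nat.prime_two).mpr (by omega)
  have hmeq : j ≡ j' [MOD n] := Nat.ModEq.cancel_left_of_coprime (by simpa using hcop) h
  have hmod : j % n = j' % n := hmeq
  rw [Nat.mod_eq_of_lt hj, Nat.mod_eq_of_lt hj'] at hmod
  exact hmod

lemma pv_build_get (a_list : List Int) (n : Nat) (hn : n % 2 = 1) :
    ∀ m ≤ n, ∀ j < m, (pv_build a_list n m)[(2 * j) % n]? = some (a_list.getD j 0) := by
  intro m
  induction m with
  | zero => intro _ j hj; omega
  | succ k ih =>
      intro hk j hj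
      have hklen : (pv_build a_list n k).length = n := pv_build_length a_list n k
      have hlt : (2 * j) % n < n := Nat.mod_lt _ (by omega)
      have hstep : pv_build a_list n (k + 1)
          = (pv_build a_list n k).set ((2 * k) % n) (a_list.getD k 0) := by
        unfold pv_build
        rw [List.range_succ, List.foldl_append]
        rfl
      rcases Nat.lt_succ_iff_lt_or_eq.mp hj with hjk | hjk
      · have hne : (2 * k) % n ≠ (2 * j) % n := by
          intro he
          exact absurd (pv_scatter_inj hn (by omega) (by omega) he) (by omega)
        rw [hstep, List.getElem?_set_ne hne]
        exact ih (by omega) j hjk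
      · subst hjk
        rw [hstep]
        rw [List.getElem?_set_self (by omega)]

-- Key number fact: (n+1)/2 inverts 2 modulo the odd n.
lemma pv_inverse {n i : Nat} (hn : n % 2 = 1) (hi : i < n) :
    (2 * ((i * ((n + 1) / 2)) % n)) % n = i := by
  set tmp := (n + 1) / 2 with htmp
  have h2 : 2 * tmp = n + 1 := by omega
  have e1 : (2 * ((i * tmp) % n)) % n = (2 * (i * tmp)) % n :=
    Nat.ModEq.mul_left 2 (Nat.mod_modEq (i * tmp) n)
  have e2 : 2 * (i * tmp) = i + i * n := by
    rw [show 2 * (i * tmp) = i * (2 * tmp) from by ring, h2]; ring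
  rw [e1, e2, Nat.add_mul_mod_self_right, Nat.mod_eq_of_lt hi]

-- A's port, reduced to a Nat-level map.
lemma pv_A_eq (a_list : List Int) :
    remake_list a_list
      = (List.range a_list.length).map
          (fun i => a_list.getD ((i * ((a_list.length + 1) / 2)) % a_list.length) 0) := by
  unfold remake_list
  set n := a_list.length with hndef
  show (PySem.List.pyRange 0 (n : Int) 1).foldl
      (fun res_list i => res_list ++ [(PySem.List.pyGet? a_list
        (PySem.Int.mod (i * PySem.Int.floordiv ((n : Int) + 1) 2) (n : Int))).getD 0]) [] = _
  rw [PySem.List.pyRange_zero_nat, List.foldl_map]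
  have hfun : ∀ (res : List Int) (i : Nat),
      res ++ [(PySem.List.pyGet? a_list
        (PySem.Int.mod ((i : Int) * PySem.Int.floordiv ((n : Int) + 1) 2) (n : Int))).getD 0]
      = res ++ [a_list.getD ((i * ((n + 1) / 2)) % n) 0] := by
    intro res i
    have h1 : PySem.Int.floordiv ((n : Int) + 1) 2 = (((n + 1) / 2 : Nat) : Int) := by
      have := PySem.Int.floordiv_natCast (n + 1) 2
      push_cast at this ⊢
      exact this
    rw [h1]
    have h2 : (i : Int) * (((n + 1) / 2 : Nat) : Int) = ((i * ((n + 1) / 2) : Nat) : Int) := by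
      push_cast; ring
    rw [h2, PySem.Int.mod_natCast, PySem.List.pyGet?_natCast]
    simp only [List.getD_eq_getElem?_getD]
  simp only [hfun]
  rw [pv_foldl_append_map]
  simp
lemma pv_B_eq (a_list : List Int) :
    remake_list_alt a_list = pv_build a_list a_list.length a_list.length := by
  unfold remake_list_alt pv_build
  set n := a_list.length with hndef
  show (PySem.List.pyRange 0 (n : Int) 1).foldl
      (fun res j => res.set (PySem.Int.mod (2 * j) (n : Int)).toNat
        ((PySem.List.pyGet? a_list j).getD 0)) (List.replicate n 0) = _
  rw [PySem.List.pyRange_zero_nat, List.foldl_map]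
  have hfun : ∀ (res : List Int) (j : Nat),
      res.set (PySem.Int.mod (2 * (j : Int)) (n : Int)).toNat
        ((PySem.List.pyGet? a_list (j : Int)).getD 0)
      = res.set ((2 * j) % n) (a_list.getD j 0) := by
    intro res j
    have h2 : 2 * (j : Int) = ((2 * j : Nat) : Int) := by push_cast; ring
    rw [h2, PySem.Int.mod_natCast, PySem.List.pyGet?_natCast]
    simp only [Int.toNat_natCast, List.getD_eq_getElem?_getD]
  simp only [hfun]

-- ===== VERDICT (by name: the statement is the Claim_ definition above) =====
theorem remake_list_spec : Claim_equal_remake_list := by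
  intro a_list _hdom hpre
  unfold Spec_remake_list
  set n := a_list.length with hndef
  have hn : n % 2 = 1 := hpre
  rw [pv_A_eq, pv_B_eq]
  apply List.ext_getElem?
  intro i
  by_cases hi : i < n
  · have hA : ((List.range n).map
        (fun i => a_list.getD ((i * ((n + 1) / 2)) % n) 0))[i]?
        = some (a_list.getD ((i * ((n + 1) / 2)) % n) 0) := by
      rw [List.getElem?_map]
      simp [List.getElem?_range hi]
    have hkey := pv_inverse (i := i) hn hi
    have hB := pv_build_get a_list n hn n (le_refl n) ((i * ((n + 1) / 2)) % n)
        (Nat.mod_lt _ (by omega))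
    rw [hkey] at hB
    rw [hA, hB]
  · have hB : (pv_build a_list n n)[i]? = none := by
      rw [List.getElem?_eq_none_iff, pv_build_length]; omega
    rw [hB, List.getElem?_eq_none_iff]
    simpa using by omega
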